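-- pv_equiv track=rewrite | github.com/engryamato/HVAC_Canvas_App | fix-markdown-lint.py | fix_blanks_around_lists
-- ===== SOURCE A (Python) =====
-- from typing import List
--
-- def fix_blanks_around_lists(lines: List[str]) -> List[str]:
--     """Add blank lines before and after lists."""
--     result = []
--     in_list = False
--     i = 0
--
--     while i < len(lines):
--         line = lines[i]
--         stripped = line.strip()
--
--         # Check if this is a list item
--         is_list_item = (
--             stripped.startswith('- ') or
--             stripped.startswith('* ') or
--             (len(stripped) > 2 and stripped[0].isdigit() and stripped[1:].lstrip().startswith('. '))
--         )
--
--         # Check if previous line suggests context where blank is needed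
--         prev_line = result[-1].strip() if result else ''
--         prev_is_header = prev_line.startswith('#')
--         prev_is_bold_label = prev_line.startswith('**') and prev_line.endswith('**:')
--         prev_is_validation = 'Validation Method' in prev_line or 'Expected Result' in prev_line
--
--         if is_list_item:
--             if not in_list:
--                 # Starting a new list - check if we need blank line before
--                 if result and result[-1].strip() != '' and not (prev_is_header or prev_is_bold_label or prev_is_validation):
--                     result.append('\n')
--                 in_list = True
--             result.append(line)
--         else:
--             if in_list and stripped != '':
--                 # Ending a list - check if we need blank line after
--                 # Don't add if next line is a fence, horizontal rule, or header
--                 if not stripped.startswith('```') and stripped != '---' and not stripped.startswith('#'):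
--                     result.append('\n')
--                 in_list = False
--             elif in_list and stripped == '':
--                 in_list = False
--
--             result.append(line)
--
--         i += 1
--
--     return result
-- ===== SOURCE B (Python) =====
-- from typing import List
--
--
-- def _is_item(line: str) -> bool:
--     s = line.strip()
--     return (s.startswith('- ') or s.startswith('* ') or
--             (len(s) > 2 and s[0].isdigit() and s[1:].lstrip().startswith('. ')))
--
--
-- def _needs_before(prev: str) -> bool:
--     p = prev.strip()
--     return (p != '' and not p.startswith('#') and
--             not (p.startswith('**') and p.endswith('**:')) and
--             not ('Validation Method' in p or 'Expected Result' in p))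
--
--
-- def _needs_after(nxt: str) -> bool:
--     s = nxt.strip()
--     return (s != '' and not s.startswith('```') and s != '---' and
--             not s.startswith('#'))
--
--
-- def fix_blanks_around_lists(lines: List[str]) -> List[str]:
--     """Add blank lines before and after lists (block-based two-phase scan)."""
--     out = []
--     i, n = 0, len(lines)
--     while i < n:
--         if _is_item(lines[i]):
--             j = i
--             while j < n and _is_item(lines[j]):
--                 j += 1
--             # maximal list block lines[i:j]
--             if i > 0 and _needs_before(lines[i - 1]):
--                 out.append('\n')
--             out.extend(lines[i:j])
--             if j < n and _needs_after(lines[j]):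
--                 out.append('\n')
--             i = j
--         else:
--             out.append(lines[i])
--             i += 1
--     return out
-- ===== Notes on version B (the rewrite author's own statement) =====
-- stated objective: alternative
-- what changed: Replaces A's single-pass in_list state machine (which consults result[-1]) with a block-based scan: find each maximal run of consecutive list-item lines, copy it, and decide the blank line before from lines[i-1] and the blank line after from the line terminating the run.
import Mathlib
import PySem

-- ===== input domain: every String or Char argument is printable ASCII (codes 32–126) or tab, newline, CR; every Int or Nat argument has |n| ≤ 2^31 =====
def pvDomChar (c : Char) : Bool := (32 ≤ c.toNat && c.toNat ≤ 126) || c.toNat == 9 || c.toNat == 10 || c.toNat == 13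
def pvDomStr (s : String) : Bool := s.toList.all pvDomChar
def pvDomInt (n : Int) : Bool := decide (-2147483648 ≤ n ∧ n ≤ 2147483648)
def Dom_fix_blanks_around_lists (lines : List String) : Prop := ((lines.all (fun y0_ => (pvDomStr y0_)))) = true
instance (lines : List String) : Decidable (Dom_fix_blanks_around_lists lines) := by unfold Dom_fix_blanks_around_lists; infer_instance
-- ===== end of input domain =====

-- B replaces A's in_list state machine with a block-based scan over maximal runs
-- of list-item lines (alternative decomposition, same cost); return values proved equal.


-- ===== PORT A =====
-- one loop iteration of A's while loop: state = (result, in_list)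
def pvStepA (st : List String × Bool) (line : String) : List String × Bool :=
  let result := st.1
  let in_list := st.2
  let stripped := PySem.Str.strip line
  let is_list_item : Bool :=
    PySem.Str.startswith stripped "- " || PySem.Str.startswith stripped "* " ||
      (decide (2 < PySem.Str.len stripped) &&
        (match stripped.toList with
         | [] => false
         | c :: _ => PySem.Chars.isdigit c) &&
        PySem.Str.startswith (PySem.Str.lstrip (PySem.Str.slice stripped (some 1) none)) ". ")
  let prev_line : String := match result.getLast? with
    | some r => PySem.Str.strip r
    | none => ""
  let prev_is_header := PySem.Str.startswith prev_line "#"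
  let prev_is_bold_label := PySem.Str.startswith prev_line "**" && PySem.Str.endswith prev_line "**:"
  let prev_is_validation := PySem.Str.isIn "Validation Method" prev_line || PySem.Str.isIn "Expected Result" prev_line
  if is_list_item then
    let result :=
      if !in_list && !result.isEmpty && prev_line != "" &&
          !(prev_is_header || prev_is_bold_label || prev_is_validation)
      then result ++ ["\n"] else result
    (result ++ [line], true)
  else
    if in_list && stripped != "" then
      let result :=
        if !PySem.Str.startswith stripped "```" && stripped != "---" && !PySem.Str.startswith stripped "#"
        then result ++ ["\n"] else result
      (result ++ [line], false)
    else if in_list && stripped == "" then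
      (result ++ [line], false)
    else
      (result ++ [line], in_list)

def fix_blanks_around_lists (lines : List String) : List String :=
  (lines.foldl pvStepA ([], false)).1

-- ===== PORT B =====
def pvIsItem (line : String) : Bool :=
  let s := PySem.Str.strip line
  PySem.Str.startswith s "- " || PySem.Str.startswith s "* " ||
    (decide (2 < PySem.Str.len s) &&
      (match s.toList with
       | [] => false
       | c :: _ => PySem.Chars.isdigit c) &&
      PySem.Str.startswith (PySem.Str.lstrip (PySem.Str.slice s (some 1) none)) ". ")

def pvNeedsBefore : Option String → Bool
  | none => false
  | some prev =>
    let p := PySem.Str.strip prev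
    p != "" && !PySem.Str.startswith p "#" &&
      !(PySem.Str.startswith p "**" && PySem.Str.endswith p "**:") &&
      !(PySem.Str.isIn "Validation Method" p || PySem.Str.isIn "Expected Result" p)

def pvNeedsAfter (nxt : String) : Bool :=
  let s := PySem.Str.strip nxt
  s != "" && !PySem.Str.startswith s "```" && s != "---" && !PySem.Str.startswith s "#"

-- the block scan: prev carries the previous original line (Source B's lines[i-1], none at i = 0);
-- the inner `while j < n` run-collection is List.takeWhile / List.dropWhile on the suffix.
def pvAltGo (prev : Option String) : List String → List String
  | [] => []
  | l :: rest =>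
    if h : pvIsItem l = true then
      let run := List.takeWhile pvIsItem (l :: rest)
      let rest' := List.dropWhile pvIsItem (l :: rest)
      (if pvNeedsBefore prev then ["\n"] else []) ++ run ++
        (match rest' with
         | [] => []
         | nl :: _ => if pvNeedsAfter nl then ["\n"] else []) ++
        pvAltGo (some (run.getLastD l)) rest'
    else
      l :: pvAltGo (some l) rest
termination_by rest => rest.length
decreasing_by
  · simp only [List.dropWhile_cons, h, if_pos]
    exact Nat.lt_succ_of_le (List.length_dropWhile_le pvIsItem rest)
  · simp

def fix_blanks_around_lists_alt (lines : List String) : List String :=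
  pvAltGo none lines

-- ===== PRECONDITION & SPEC =====
def Spec_fix_blanks_around_lists (lines : List String) (out : List String) : Prop := out = fix_blanks_around_lists_alt lines
instance (lines : List String) (out : List String) : Decidable (Spec_fix_blanks_around_lists lines out) := by unfold Spec_fix_blanks_around_lists; infer_instance

-- ===== CLAIM (what is proved, stated in full; the proofs are below) =====
def Claim_equal_fix_blanks_around_lists : Prop := ∀ (lines : List String), Dom_fix_blanks_around_lists lines → Spec_fix_blanks_around_lists lines (fix_blanks_around_lists lines)

-- ===== LEMMAS AND PROOFS =====

-- what B emits after a finished run: the terminating suffix rest' handled from its head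
def pvTail : List String → List String
  | [] => []
  | l' :: r'' => (if pvNeedsAfter l' then ["\n"] else []) ++ l' :: pvAltGo (some l') r''

lemma stepA_item_true (res : List String) (l : String) (h : pvIsItem l = true) :
    pvStepA (res, true) l = (res ++ [l], true) := by
  simp only [pvStepA, pvIsItem] at h ⊢; rw [h]; simp

lemma stepA_item_false (res : List String) (l : String) (h : pvIsItem l = true) :
    pvStepA (res, false) l =
      ((if pvNeedsBefore res.getLast? then res ++ ["\n"] else res) ++ [l], true) := by
  simp only [pvStepA, pvIsItem] at h ⊢; rw [h]
  simp only [Bool.not_false, Bool.true_and]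
  cases hres : res.getLast? with
  | none =>
    have : res = [] := List.getLast?_eq_none_iff.mp hres
    subst this; simp [pvNeedsBefore]
  | some r =>
    have hne : ¬ res.isEmpty := by
      intro hE; rw [List.isEmpty_iff.mp hE] at hres; simp at hres
    simp only [pvNeedsBefore, hne, Bool.not_false, Bool.true_and]
    have key : ∀ x hh b v : Bool, (x && !(hh || b || v)) = (x && !hh && !b && !v) := by decide
    rw [key]; simp

lemma stepA_nonitem_false (res : List String) (l : String) (h : pvIsItem l = false) :
    pvStepA (res, false) l = (res ++ [l], false) := by
  simp only [pvStepA, pvIsItem] at h ⊢; rw [h]; simp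

lemma stepA_nonitem_true (res : List String) (l : String) (h : pvIsItem l = false) :
    pvStepA (res, true) l =
      ((if pvNeedsAfter l then res ++ ["\n"] else res) ++ [l], false) := by
  simp only [pvStepA, pvIsItem] at h ⊢; rw [h]
  simp only [pvNeedsAfter, Bool.false_eq_true, if_false, Bool.true_and]
  by_cases hs : PySem.Str.strip l = ""
  · simp [hs]
  · have : (PySem.Str.strip l != "") = true := by simpa [bne] using hs
    simp [this]

lemma altGo_nonitem (prev : Option String) (l : String) (rest : List String)
    (h : pvIsItem l = false) :
    pvAltGo prev (l :: rest) = l :: pvAltGo (some l) rest := by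
  rw [pvAltGo]; simp [h]

lemma head_dropWhile_false (rest : List String) (nl : String) (r'' : List String)
    (hr : List.dropWhile pvIsItem rest = nl :: r'') : pvIsItem nl = false := by
  have := List.head_dropWhile_not pvIsItem (l := rest) (by simp [hr])
  simpa [hr] using this

lemma altGo_item (prev : Option String) (l : String) (rest : List String)
    (h : pvIsItem l = true) :
    pvAltGo prev (l :: rest) =
      (if pvNeedsBefore prev then ["\n"] else []) ++ (l :: List.takeWhile pvIsItem rest) ++
        pvTail (List.dropWhile pvIsItem rest) := by
  rw [pvAltGo]
  simp only [h, dite_true, List.takeWhile_cons, List.dropWhile_cons, if_pos]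
  cases hr : List.dropWhile pvIsItem rest with
  | nil => simp [pvAltGo, pvTail]
  | cons nl r'' =>
    have hnl : pvIsItem nl = false := head_dropWhile_false rest nl r'' hr
    rw [altGo_nonitem _ _ _ hnl]
    simp [pvTail]

lemma main_invariant (n : Nat) : ∀ rest : List String, rest.length ≤ n →
    (∀ res : List String,
      (List.foldl pvStepA (res, false) rest).1 = res ++ pvAltGo res.getLast? rest) ∧
    (∀ res : List String,
      (List.foldl pvStepA (res, true) rest).1 =
        res ++ List.takeWhile pvIsItem rest ++ pvTail (List.dropWhile pvIsItem rest)) := by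
  induction n with
  | zero =>
    intro rest hlen
    have : rest = [] := List.eq_nil_of_length_eq_zero (Nat.le_zero.mp hlen)
    subst this
    constructor <;> intro res <;> simp [pvAltGo, pvTail]
  | succ n ih =>
    intro rest hlen
    cases rest with
    | nil => constructor <;> intro res <;> simp [pvAltGo, pvTail]
    | cons l rest =>
      have hlen' : rest.length ≤ n := by simpa using Nat.lt_succ_iff.mp (by simpa using hlen)
      obtain ⟨ihF, ihT⟩ := ih rest hlen'
      constructor
      · intro res
        by_cases h : pvIsItem l = true
        · rw [List.foldl_cons, stepA_item_false res l h, ihT, altGo_item _ _ _ h]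
          by_cases hb : pvNeedsBefore res.getLast? = true <;> simp [hb]
        · have h' : pvIsItem l = false := eq_false_of_ne_true h
          rw [List.foldl_cons, stepA_nonitem_false res l h', ihF, altGo_nonitem _ _ _ h']
          simp
      · intro res
        by_cases h : pvIsItem l = true
        · rw [List.foldl_cons, stepA_item_true res l h, ihT]
          simp [h]
        · have h' : pvIsItem l = false := eq_false_of_ne_true h
          rw [List.foldl_cons, stepA_nonitem_true res l h', ihF]
          simp only [List.takeWhile_cons, List.dropWhile_cons, h', if_neg, Bool.false_eq_true,
            not_false_eq_true, pvTail, List.getLast?_concat]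
          by_cases ha : pvNeedsAfter l = true <;> simp [ha]

-- ===== VERDICT (by name: the statement is the Claim_ definition above) =====
theorem fix_blanks_around_lists_spec : Claim_equal_fix_blanks_around_lists := by
  intro lines _
  unfold Spec_fix_blanks_around_lists fix_blanks_around_lists fix_blanks_around_lists_alt
  have h := (main_invariant lines.length lines le_rfl).1 []
  simpa using h
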